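-- pv_equiv track=rewrite | github.com/AnandKumar-92/DSAPython | changechar.py | solve
-- ===== SOURCE A (Python) =====
-- def solve(A, B):
--     count = {}
--     res = 0
--     for i in A:
--         if i in count:
--             count[i] += 1
--         else:
--             count[i] = 1
--         if count[i] == B:
--             res += 1
--     return res
-- ===== SOURCE B (Python) =====
-- def solve(A, B):
--     # Two-phase: build the full frequency table first, then count the distinct
--     # values whose total frequency reaches B (the running count hits B exactly
--     # once iff 1 <= B <= final frequency).
--     freq = {}
--     for i in A:
--         freq[i] = freq.get(i, 0) + 1
--     return sum(1 for v in freq.values() if 1 <= B <= v)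
-- ===== Notes on version B (the rewrite author's own statement) =====
-- stated objective: alternative
-- what changed: A fuses counting and checking in one loop, incrementing the result when an element's running count equals B; B first builds the complete frequency table and then, in a separate reduction, counts the distinct values whose total frequency v satisfies 1 <= B <= v.
import Mathlib
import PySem

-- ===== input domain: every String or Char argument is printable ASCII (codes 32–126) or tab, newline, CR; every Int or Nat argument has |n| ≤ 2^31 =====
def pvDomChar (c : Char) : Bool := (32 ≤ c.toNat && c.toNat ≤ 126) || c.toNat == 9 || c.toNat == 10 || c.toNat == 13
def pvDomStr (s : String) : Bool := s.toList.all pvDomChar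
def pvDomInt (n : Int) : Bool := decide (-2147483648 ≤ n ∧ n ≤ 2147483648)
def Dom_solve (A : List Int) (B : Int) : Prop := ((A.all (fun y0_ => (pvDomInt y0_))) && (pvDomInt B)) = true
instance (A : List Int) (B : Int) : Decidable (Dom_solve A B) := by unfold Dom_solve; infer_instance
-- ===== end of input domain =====

-- B replaces A's fused count-and-check loop by a build-frequency-table phase followed by a
-- separate reduction counting distinct values whose total frequency reaches B (objective: alternative).

-- ===== PORT A =====
def solve (A : List Int) (B : Int) : Int :=
  (A.foldl
    (fun (st : PySem.Dict Int Int × Int) (i : Int) =>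
      let count := if st.1.contains i then st.1.modify i 0 (· + 1) else st.1.insert i 1
      let res := if count.getD i 0 = B then st.2 + 1 else st.2
      (count, res))
    (PySem.Dict.empty, 0)).2

-- ===== PORT B =====
def solve_alt (A : List Int) (B : Int) : Int :=
  let freq := A.foldl (fun (d : PySem.Dict Int Int) (i : Int) => d.insert i (d.getD i 0 + 1)) PySem.Dict.empty
  ((freq.values.filter (fun v => decide (1 ≤ B ∧ B ≤ v))).length : Int)

-- ===== PRECONDITION & SPEC =====
def Spec_solve (A : List Int) (B : Int) (out : Int) : Prop := out = solve_alt A B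
instance (A : List Int) (B : Int) (out : Int) : Decidable (Spec_solve A B out) := by unfold Spec_solve; infer_instance

-- ===== CLAIM (what is proved, stated in full; the proofs are below) =====
def Claim_equal_solve : Prop := ∀ (A : List Int) (B : Int), Dom_solve A B → Spec_solve A B (solve A B)

-- ===== LEMMAS AND PROOFS =====

-- A's dict update (branch on membership) is exactly one Python-style modify/insert-with-default.
theorem solve_dict_step (d : PySem.Dict Int Int) (i : Int) :
    (if d.contains i then d.modify i 0 (· + 1) else d.insert i 1) = d.insert i (d.getD i 0 + 1) := by
  by_cases h : d.contains i = true
  · simp [h, PySem.Dict.modify]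
  · have hc : d.contains i = false := by simpa using h
    have h0 : d.getD i 0 = 0 := PySem.Dict.getD_of_not_contains d 0 hc
    simp [h, h0]

-- the count B counts, as a function of the list
def resB (B : Int) (xs : List Int) : Nat :=
  ((PySem.Set.ofList xs).filter (fun k => decide (1 ≤ B ∧ B ≤ (xs.count k : Int)))).length

theorem count_append_singleton (xs : List Int) (x k : Int) :
    (xs ++ [x]).count k = xs.count k + (if k = x then 1 else 0) := by
  rw [List.count_append]
  by_cases h : k = x
  · subst h; simp
  · have h' : x ≠ k := fun hh => h hh.symm
    simp [h, h']

theorem resB_append_singleton (B : Int) (xs : List Int) (x : Int) :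
    (resB B (xs ++ [x]) : Int) = resB B xs + (if (xs.count x : Int) + 1 = B then 1 else 0) := by
  classical
  have hcount : ∀ k, k ≠ x → (xs ++ [x]).count k = xs.count k := by
    intro k hk; rw [count_append_singleton]; simp [hk]
  have hx : (xs ++ [x]).count x = xs.count x + 1 := by
    rw [count_append_singleton]; simp
  unfold resB
  rw [PySem.Set.ofList_append_singleton]
  by_cases hmem : x ∈ xs
  · -- x already present: the ordered set is unchanged, the predicate changes only at x
    rw [PySem.Set.add_of_mem (by simpa [PySem.Set.mem_ofList] using hmem)]
    have hnd : (PySem.Set.ofList xs).Nodup := PySem.Set.nodup_ofList xs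
    have hxl : x ∈ PySem.Set.ofList xs := by simpa [PySem.Set.mem_ofList] using hmem
    have hperm : List.Perm (PySem.Set.ofList xs) (x :: (PySem.Set.ofList xs).erase x) :=
      List.perm_cons_erase hxl
    have hne : ∀ k ∈ (PySem.Set.ofList xs).erase x, k ≠ x := by
      intro k hk
      exact ((List.Nodup.mem_erase_iff hnd).1 hk).1
    have split : ∀ (p : Int → Bool),
        ((PySem.Set.ofList xs).filter p).length
          = (if p x then 1 else 0) + (((PySem.Set.ofList xs).erase x).filter p).length := by
      intro p
      have hp2 := hperm.filter p
      rw [hp2.length_eq]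
      by_cases hp : p x <;> simp [hp] <;> omega
    rw [split, split]
    have heq : (((PySem.Set.ofList xs).erase x).filter (fun k => decide (1 ≤ B ∧ B ≤ ((xs ++ [x]).count k : Int)))).length
        = (((PySem.Set.ofList xs).erase x).filter (fun k => decide (1 ≤ B ∧ B ≤ (xs.count k : Int)))).length := by
      rw [List.filter_congr]
      intro k hk
      rw [hcount k (hne k hk)]
    rw [heq, hx]
    push_cast
    simp only [decide_eq_true_eq]
    split_ifs <;> omega
  · -- x is new: it is appended to the ordered set with frequency 1
    rw [PySem.Set.add_of_not_mem (by simpa [PySem.Set.mem_ofList] using hmem)]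
    have hxc : xs.count x = 0 := List.count_eq_zero.2 hmem
    rw [List.filter_append]
    have heq : ((PySem.Set.ofList xs).filter (fun k => decide (1 ≤ B ∧ B ≤ ((xs ++ [x]).count k : Int)))).length
        = ((PySem.Set.ofList xs).filter (fun k => decide (1 ≤ B ∧ B ≤ (xs.count k : Int)))).length := by
      rw [List.filter_congr]
      intro k hk
      have hkx : k ≠ x := by
        intro h; subst h
        exact hmem (by simpa [PySem.Set.mem_ofList] using hk)
      rw [hcount k hkx]
    rw [List.length_append, heq]
    have hq : ∀ (p : Int → Bool) (a : Int), (List.filter p [a]).length = if p a then 1 else 0 := by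
      intro p a; cases hp : p a <;> simp [hp]
    rw [hq]
    simp only [decide_eq_true_eq]
    rw [hx, hxc]
    push_cast
    split_ifs <;> omega

-- main invariant: A's fused fold carries the counter and B's count
theorem solve_fold_eq (B : Int) (xs : List Int) :
    xs.foldl
      (fun (st : PySem.Dict Int Int × Int) (i : Int) =>
        let count := if st.1.contains i then st.1.modify i 0 (· + 1) else st.1.insert i 1
        let res := if count.getD i 0 = B then st.2 + 1 else st.2
        (count, res))
      (PySem.Dict.empty, 0)
    = (PySem.Dict.counter xs, (resB B xs : Int)) := by
  induction xs using List.reverseRecOn with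
  | nil => rfl
  | append_singleton xs x ih =>
    rw [List.foldl_append, ih]
    simp only [List.foldl_cons, List.foldl_nil, solve_dict_step]
    have hdict : (PySem.Dict.counter xs).insert x ((PySem.Dict.counter xs).getD x 0 + 1)
        = PySem.Dict.counter (xs ++ [x]) := by
      rw [PySem.Dict.counter_append_singleton]
      simp [PySem.Dict.modify]
    have hgd : ((PySem.Dict.counter xs).insert x ((PySem.Dict.counter xs).getD x 0 + 1)).getD x 0
        = (xs.count x : Int) + 1 := by
      rw [PySem.Dict.getD_insert_self, PySem.Dict.getD_counter]
    refine Prod.ext hdict ?_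
    simp only [hgd, resB_append_singleton]
    split_ifs with h <;> simp

-- B's result as a function of the deduplicated list
theorem solve_alt_eq (A : List Int) (B : Int) : solve_alt A B = (resB B A : Int) := by
  unfold resB
  simp only [solve_alt, PySem.Dict.foldl_insert_getD_add_one_eq_counter]
  have hv : (PySem.Dict.counter A).values = (PySem.Set.ofList A).map (fun k => (A.count k : Int)) := by
    have := PySem.Dict.items_counter (xs := A)
    simp only [PySem.Dict.values, this, List.map_map]
    rfl
  rw [hv, List.filter_map, List.length_map]
  rfl

-- ===== VERDICT (by name: the statement is the Claim_ definition above) =====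
theorem solve_spec : Claim_equal_solve := by
  intro A B _
  unfold Spec_solve solve
  rw [solve_fold_eq, solve_alt_eq]
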